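-- pv_equiv track=rewrite | github.com/AraaaAraa/SegundoParcial | validaciones_y_prints.py | calcular_racha_en_partida
-- ===== SOURCE A (Python) =====
-- def calcular_racha_en_partida(respuestas_actuales: list) -> int:
--     if not respuestas_actuales:
--         return 0
--
--     racha_actual = 0
--     i = len(respuestas_actuales) - 1
--
--     while i >= 0:
--         respuesta = respuestas_actuales[i]
--         es_correcta = False
--         for clave in respuesta:
--             if clave == "es_correcta":
--                 es_correcta = respuesta[clave]
--                 break
--
--         if es_correcta:
--             racha_actual += 1
--         else:
--             break
--
--         i -= 1
--
--     return racha_actual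
-- ===== SOURCE B (Python) =====
-- def calcular_racha_en_partida(respuestas_actuales: list) -> int:
--     racha = 0
--     for respuesta in respuestas_actuales:
--         if respuesta.get("es_correcta"):
--             racha += 1
--         else:
--             racha = 0
--     return racha
-- ===== Notes on version B (the rewrite author's own statement) =====
-- stated objective: simpler
-- what changed: Replaces the backward index loop with early break (and the hand-written key scan per dict) by a single forward pass that increments a counter on a correct answer and resets it to 0 otherwise, using dict.get.
import Mathlib
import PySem

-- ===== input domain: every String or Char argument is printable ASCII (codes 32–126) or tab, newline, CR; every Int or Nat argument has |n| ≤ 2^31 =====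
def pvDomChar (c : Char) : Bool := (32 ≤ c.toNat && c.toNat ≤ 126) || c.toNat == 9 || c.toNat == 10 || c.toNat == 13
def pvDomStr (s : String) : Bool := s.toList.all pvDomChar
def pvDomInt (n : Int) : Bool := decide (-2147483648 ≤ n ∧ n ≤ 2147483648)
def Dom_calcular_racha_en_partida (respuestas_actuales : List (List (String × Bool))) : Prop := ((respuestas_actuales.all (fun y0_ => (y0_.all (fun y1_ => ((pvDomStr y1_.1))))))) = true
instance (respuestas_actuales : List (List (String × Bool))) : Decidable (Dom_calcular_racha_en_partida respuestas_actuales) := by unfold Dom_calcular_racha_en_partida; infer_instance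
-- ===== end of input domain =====

-- ===== PORT A =====
-- B replaces A's backward index loop (early break) by a forward counter pass; simpler decomposition, same values.

-- A's inner `for clave in respuesta: if clave == "es_correcta": es_correcta = respuesta[clave]; break`
-- (default False when the key is absent)
def pvA_es_correcta : List (String × Bool) → Bool
  | [] => false
  | (k, v) :: rest => if k = "es_correcta" then v else pvA_es_correcta rest

-- A's `while i >= 0` loop; the Nat argument is i+1 (0 means i = -1, loop exits)
def pvA_loop (xs : List (List (String × Bool))) : Nat → Int → Int
  | 0, racha => racha
  | n + 1, racha =>
    let respuesta := (PySem.List.pyGet? xs (n : Int)).getD []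
    if pvA_es_correcta respuesta then pvA_loop xs n (racha + 1) else racha

def calcular_racha_en_partida (respuestas_actuales : List (List (String × Bool))) : Int :=
  if respuestas_actuales = [] then 0
  else pvA_loop respuestas_actuales respuestas_actuales.length 0

-- ===== PORT B =====
-- `respuesta.get("es_correcta")` is truthy iff the first "es_correcta" entry holds true (None/False otherwise)
def pvB_correcta (r : List (String × Bool)) : Bool :=
  ((PySem.Dict.mk r).get? "es_correcta").getD false

def calcular_racha_en_partida_alt (respuestas_actuales : List (List (String × Bool))) : Int :=
  respuestas_actuales.foldl (fun racha respuesta => if pvB_correcta respuesta then racha + 1 else 0) 0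

-- ===== PRECONDITION & SPEC =====
def Spec_calcular_racha_en_partida (respuestas_actuales : List (List (String × Bool))) (out : Int) : Prop := out = calcular_racha_en_partida_alt respuestas_actuales
instance (respuestas_actuales : List (List (String × Bool))) (out : Int) : Decidable (Spec_calcular_racha_en_partida respuestas_actuales out) := by unfold Spec_calcular_racha_en_partida; infer_instance

-- ===== CLAIM =====
def Claim_equal_calcular_racha_en_partida : Prop := ∀ (respuestas_actuales : List (List (String × Bool))), Dom_calcular_racha_en_partida respuestas_actuales → Spec_calcular_racha_en_partida respuestas_actuales (calcular_racha_en_partida respuestas_actuales)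

-- ===== LEMMAS AND PROOFS =====

-- count of the leading run of correct answers
def pvCW : List (List (String × Bool)) → Int
  | [] => 0
  | r :: t => if pvB_correcta r then 1 + pvCW t else 0

theorem pvCW_all (l : List (List (String × Bool))) (h : ∀ r ∈ l, pvB_correcta r = true) :
    pvCW l = (l.length : Int) := by
  induction l with
  | nil => simp [pvCW]
  | cons r t ih =>
    simp only [pvCW, h r (by simp), if_pos]
    rw [ih (fun x hx => h x (by simp [hx]))]
    simp; omega

theorem pv_correcta_eq (r : List (String × Bool)) : pvA_es_correcta r = pvB_correcta r := by
  induction r with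
  | nil => rfl
  | cons p t ih =>
    obtain ⟨k, v⟩ := p
    by_cases hk : k = "es_correcta"
    · subst hk
      simp [pvA_es_correcta, pvB_correcta, PySem.Dict.get?_mk_cons]
    · simp [pvA_es_correcta, pvB_correcta, PySem.Dict.get?_mk_cons, hk] at ih ⊢
      simpa [pvB_correcta] using ih

theorem pvA_loop_eq (xs : List (List (String × Bool))) :
    ∀ (n : Nat), n ≤ xs.length → ∀ (racha : Int),
      pvA_loop xs n racha = racha + pvCW ((xs.take n).reverse) := by
  intro n
  induction n with
  | zero => intro _ racha; simp [pvA_loop, pvCW]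
  | succ m ih =>
    intro hn racha
    have hm : m < xs.length := by omega
    have hget : (PySem.List.pyGet? xs (m : Int)).getD [] = xs[m] := by
      rw [PySem.List.pyGet?_natCast]
      simp [hm]
    have htake : (xs.take (m + 1)).reverse = xs[m] :: (xs.take m).reverse := by
      rw [List.take_add_one]
      simp [hm]
    rw [htake]
    simp only [pvA_loop, hget, pvCW, pv_correcta_eq]
    split
    · rw [ih (by omega)]; ring
    · omega

theorem pvB_foldl (xs : List (List (String × Bool))) (c : Int) :
    xs.foldl (fun racha respuesta => if pvB_correcta respuesta then racha + 1 else 0) c =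
      if ∀ r ∈ xs, pvB_correcta r = true then c + (xs.length : Int) else pvCW xs.reverse := by
  induction xs using List.reverseRecOn generalizing c with
  | nil => simp
  | append_singleton ys x ih =>
    rw [List.foldl_append]
    simp only [List.foldl_cons, List.foldl_nil]
    rw [ih c]
    by_cases hx : pvB_correcta x = true
    · by_cases hy : ∀ r ∈ ys, pvB_correcta r = true
      · have hall : ∀ r ∈ ys ++ [x], pvB_correcta r = true := by
          intro r hr
          rcases List.mem_append.1 hr with h | h
          · exact hy r h
          · simp at h; subst h; exact hx
        rw [if_pos hy, if_pos hx, if_pos hall]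
        simp; omega
      · have hnall : ¬ ∀ r ∈ ys ++ [x], pvB_correcta r = true := by
          intro h; exact hy (fun r hr => h r (by simp [hr]))
        rw [if_neg hy, if_pos hx, if_neg hnall]
        simp only [List.reverse_append, List.reverse_singleton, List.singleton_append, pvCW,
          if_pos hx]
        omega
    · have hnall : ¬ ∀ r ∈ ys ++ [x], pvB_correcta r = true := by
        intro h; exact hx (h x (by simp))
      rw [if_neg hx, if_neg hnall]
      simp only [List.reverse_append, List.reverse_singleton, List.singleton_append, pvCW, hx]
      simp

-- ===== VERDICT =====
theorem calcular_racha_en_partida_spec : Claim_equal_calcular_racha_en_partida := by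
  intro xs _
  unfold Spec_calcular_racha_en_partida calcular_racha_en_partida calcular_racha_en_partida_alt
  by_cases h : xs = []
  · subst h; simp
  · rw [if_neg h, pvA_loop_eq xs xs.length le_rfl 0, List.take_length, pvB_foldl]
    by_cases hall : ∀ r ∈ xs, pvB_correcta r = true
    · rw [if_pos hall, pvCW_all _ (by intro r hr; exact hall r (List.mem_reverse.1 hr))]
      simp
    · rw [if_neg hall]; omega
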